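-- pv_equiv track=rewrite | github.com/frequency-perfected-generated-audio/autotune | sim/test_filter.py | bpf
-- ===== SOURCE A (Python) =====
-- FRACTION_WIDTH = 16
--
-- def bpf(y, a_coeffs, b_coeffs, fp=True):
--     new_y = [0 for _ in range(len(y))]
--     for index, y_val in enumerate(y):
--         y_0 = int(y[index])
--         y_1 = int(y[index-1])
--         y_2 = int(y[index-2])
--
--         if index == 0:
--             new_y[index] = (b_coeffs[0] * y_0) # 34 and 6
--         elif index == 1:
--             if fp:
--                 new_y[index] = b_coeffs[0] * y_0 + b_coeffs[1] * y_1 - ((a_coeffs[1] * new_y[index-1]) >> FRACTION_WIDTH)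
--             else:
--                 new_y[index] = b_coeffs[0] * y_0 + b_coeffs[1] * y_1 - a_coeffs[1] * new_y[index-1]
--         else:
--             if fp:
--                 new_y[index] = b_coeffs[0] * y_0 + b_coeffs[1] * y_1 - ((a_coeffs[1] * new_y[index-1]) >> FRACTION_WIDTH) + b_coeffs[2] * y_2 - ((a_coeffs[2] * new_y[index-2]) >> FRACTION_WIDTH)
--             else:
--                 new_y[index] = b_coeffs[0] * y_0 + b_coeffs[1] * y_1 - a_coeffs[1] * new_y[index-1] + b_coeffs[2] * y_2 - a_coeffs[2] * new_y[index-2]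
--     return new_y
-- ===== SOURCE B (Python) =====
-- FRACTION_WIDTH = 16
--
-- def bpf(y, a_coeffs, b_coeffs, fp=True):
--     # Two staged passes instead of one indexed loop with boundary branches:
--     # pass 1 computes the feed-forward (FIR) part as a plain convolution with
--     # the zero-padded b taps; pass 2 folds the recursive feedback over it.
--     ys = [int(v) for v in y]
--     n = len(ys)
--     b = (list(b_coeffs) + [0, 0, 0])[:3]
--     fir = [sum(b[k] * ys[i - k] for k in range(3) if i - k >= 0) for i in range(n)]
--     a1 = a_coeffs[1] if len(a_coeffs) > 1 else 0
--     a2 = a_coeffs[2] if len(a_coeffs) > 2 else 0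
--     out = []
--     for i, x in enumerate(fir):
--         f1 = a1 * out[i - 1] if i >= 1 else 0
--         f2 = a2 * out[i - 2] if i >= 2 else 0
--         if fp:
--             f1 >>= FRACTION_WIDTH
--             f2 >>= FRACTION_WIDTH
--         out.append(x - f1 - f2)
--     return out
-- ===== Notes on version B (the rewrite author's own statement) =====
-- stated objective: alternative
-- what changed: Splits A's single indexed loop with index==0/==1/else boundary branches into two staged passes: a branch-free FIR convolution with the zero-padded b taps, then a feedback fold over that list; the zero-padded convolution reproduces A's boundary cases automatically.
import Mathlib
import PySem

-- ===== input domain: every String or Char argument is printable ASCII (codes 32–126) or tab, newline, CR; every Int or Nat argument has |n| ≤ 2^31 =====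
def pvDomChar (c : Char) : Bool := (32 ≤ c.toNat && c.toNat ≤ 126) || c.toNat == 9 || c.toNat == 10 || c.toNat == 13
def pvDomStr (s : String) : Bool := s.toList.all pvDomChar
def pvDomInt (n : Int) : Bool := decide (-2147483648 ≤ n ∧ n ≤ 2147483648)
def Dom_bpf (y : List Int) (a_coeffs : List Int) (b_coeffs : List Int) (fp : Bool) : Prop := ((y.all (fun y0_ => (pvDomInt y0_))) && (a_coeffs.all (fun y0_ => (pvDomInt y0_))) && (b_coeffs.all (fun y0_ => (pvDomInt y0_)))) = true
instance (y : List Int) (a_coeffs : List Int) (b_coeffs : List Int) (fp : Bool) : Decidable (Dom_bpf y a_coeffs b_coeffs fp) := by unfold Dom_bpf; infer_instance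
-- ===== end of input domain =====

-- B replaces A's single indexed loop with its index==0/==1/else boundary branches by two
-- staged passes: a branch-free FIR convolution with zero-padded b taps, then a feedback fold.

-- ===== PORT A =====
-- one iteration of A's 'for index, y_val in enumerate(y)' loop body, mutating new_y
def bpfStep (y a_coeffs b_coeffs : List Int) (fp : Bool) (new_y : List Int) (index : Nat) : List Int :=
  let y_0 := PySem.List.pyGetD y (index : Int) 0
  let y_1 := PySem.List.pyGetD y ((index : Int) - 1) 0
  let y_2 := PySem.List.pyGetD y ((index : Int) - 2) 0
  let v : Int :=
    if index = 0 then
      PySem.List.pyGetD b_coeffs 0 0 * y_0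
    else if index = 1 then
      if fp then
        PySem.List.pyGetD b_coeffs 0 0 * y_0 + PySem.List.pyGetD b_coeffs 1 0 * y_1
          - ((PySem.List.pyGetD a_coeffs 1 0 * PySem.List.pyGetD new_y ((index : Int) - 1) 0) >>> 16)
      else
        PySem.List.pyGetD b_coeffs 0 0 * y_0 + PySem.List.pyGetD b_coeffs 1 0 * y_1
          - PySem.List.pyGetD a_coeffs 1 0 * PySem.List.pyGetD new_y ((index : Int) - 1) 0
    else
      if fp then
        PySem.List.pyGetD b_coeffs 0 0 * y_0 + PySem.List.pyGetD b_coeffs 1 0 * y_1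
          - ((PySem.List.pyGetD a_coeffs 1 0 * PySem.List.pyGetD new_y ((index : Int) - 1) 0) >>> 16)
          + PySem.List.pyGetD b_coeffs 2 0 * y_2
          - ((PySem.List.pyGetD a_coeffs 2 0 * PySem.List.pyGetD new_y ((index : Int) - 2) 0) >>> 16)
      else
        PySem.List.pyGetD b_coeffs 0 0 * y_0 + PySem.List.pyGetD b_coeffs 1 0 * y_1
          - PySem.List.pyGetD a_coeffs 1 0 * PySem.List.pyGetD new_y ((index : Int) - 1) 0
          + PySem.List.pyGetD b_coeffs 2 0 * y_2
          - PySem.List.pyGetD a_coeffs 2 0 * PySem.List.pyGetD new_y ((index : Int) - 2) 0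
  new_y.set index v

def bpf (y : List Int) (a_coeffs : List Int) (b_coeffs : List Int) (fp : Bool) : List Int :=
  (List.range y.length).foldl (bpfStep y a_coeffs b_coeffs fp) (List.replicate y.length 0)

-- ===== PORT B =====
-- pass 1: 'sum(b[k] * ys[i-k] for k in range(3) if i-k >= 0)' (Nat subtraction ≥ 0 encodes the filter)
def bpfFir (b ys : List Int) (i : Nat) : Int :=
  ((List.range 3).filter (fun k => k ≤ i)).foldl (fun s k => s + b.getD k 0 * ys.getD (i - k) 0) 0

-- pass 2: one step of 'for i, x in enumerate(fir)' appending x - f1 - f2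
def bpfFbStep (a1 a2 : Int) (fp : Bool) (out : List Int) (ix : Int × Int) : List Int :=
  let f1 := if 1 ≤ ix.1 then a1 * out.getD (ix.1 - 1).toNat 0 else 0
  let f2 := if 2 ≤ ix.1 then a2 * out.getD (ix.1 - 2).toNat 0 else 0
  let f1 := if fp then f1 >>> 16 else f1
  let f2 := if fp then f2 >>> 16 else f2
  out ++ [ix.2 - f1 - f2]

def bpf_alt (y : List Int) (a_coeffs : List Int) (b_coeffs : List Int) (fp : Bool) : List Int :=
  let ys := y.map (fun v => v)
  let b := (b_coeffs ++ [0, 0, 0]).take 3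
  let fir := (List.range ys.length).map (bpfFir b ys)
  let a1 := if 1 < a_coeffs.length then a_coeffs.getD 1 0 else 0
  let a2 := if 2 < a_coeffs.length then a_coeffs.getD 2 0 else 0
  (PySem.List.enumerate fir 0).foldl (bpfFbStep a1 a2 fp) []

-- ===== PRECONDITION & SPEC =====
-- Pre_ excludes exactly the inputs where A raises IndexError: a one-element y (the read y[-2]
-- is out of range) and coefficient lists shorter than the taps A's branches index.
def Pre_bpf (y : List Int) (a_coeffs : List Int) (b_coeffs : List Int) (fp : Bool) : Prop :=
  y = [] ∨ (y.length = 2 ∧ 2 ≤ a_coeffs.length ∧ 2 ≤ b_coeffs.length)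
    ∨ (3 ≤ y.length ∧ 3 ≤ a_coeffs.length ∧ 3 ≤ b_coeffs.length)
instance (y : List Int) (a_coeffs : List Int) (b_coeffs : List Int) (fp : Bool) : Decidable (Pre_bpf y a_coeffs b_coeffs fp) := by unfold Pre_bpf; infer_instance

def pvWitness_bpf : List Int × List Int × List Int × Bool := ([5, 7, 8], [9, 3, 2], [4, 2, 5], true)

def Spec_bpf (y : List Int) (a_coeffs : List Int) (b_coeffs : List Int) (fp : Bool) (out : List Int) : Prop := out = bpf_alt y a_coeffs b_coeffs fp
instance (y : List Int) (a_coeffs : List Int) (b_coeffs : List Int) (fp : Bool) (out : List Int) : Decidable (Spec_bpf y a_coeffs b_coeffs fp out) := by unfold Spec_bpf; infer_instance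

-- ===== CLAIM (what is proved, stated in full; the proofs are below) =====
def Claim_equal_bpf : Prop := ∀ (y : List Int) (a_coeffs : List Int) (b_coeffs : List Int) (fp : Bool), Dom_bpf y a_coeffs b_coeffs fp → Pre_bpf y a_coeffs b_coeffs fp → Spec_bpf y a_coeffs b_coeffs fp (bpf y a_coeffs b_coeffs fp)

-- ===== LEMMAS AND PROOFS =====

-- B's tap b[k] from the zero-padded, truncated list equals A's raw pyGetD index for k < 3
lemma coeff_eq (l : List Int) (i : Nat) (hi : i < 3) :
    PySem.List.pyGetD l (i : Int) 0 = ((l ++ [0, 0, 0]).take 3).getD i 0 := by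
  rw [PySem.List.pyGetD_natCast]
  have ht : ((l ++ [0, 0, 0]).take 3)[i]? = (l ++ [0, 0, 0])[i]? := by
    exact List.getElem?_take_of_lt hi
  rw [List.getD_eq_getElem?_getD, List.getD_eq_getElem?_getD, ht]
  by_cases h : i < l.length
  · simp [List.getElem?_append_left h]
  · have h2 : i - l.length < 3 := by omega
    simp [List.getElem?_append_right (by omega : l.length ≤ i),
      List.getElem?_eq_none (by omega : l.length ≤ i)]
    interval_cases hh : (i - l.length) <;> simp

-- B's guarded a-tap equals the unguarded getD (both are 0 when the list is short)
lemma atap_eq (l : List Int) (j : Nat) :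
    (if j < l.length then l.getD j 0 else 0) = l.getD j 0 := by
  split
  · rfl
  · simp [List.getD, List.getElem?_eq_none (by omega : l.length ≤ j)]

-- the loop invariant: B's feedback fold over the first k FIR values equals A's array fold
lemma bpf_inv (y a_coeffs b_coeffs : List Int) (fp : Bool)
    (b fir : List Int)
    (hb : b = (b_coeffs ++ [0, 0, 0]).take 3)
    (hfir : fir = (List.range y.length).map (bpfFir b y))
    (k : Nat) (hk : k ≤ y.length) :
    ∃ out,
      ((PySem.List.enumerate fir 0).take k).foldl
          (bpfFbStep (a_coeffs.getD 1 0) (a_coeffs.getD 2 0) fp) [] = out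
      ∧ (List.range k).foldl (bpfStep y a_coeffs b_coeffs fp) (List.replicate y.length 0)
          = out ++ List.replicate (y.length - k) 0
      ∧ out.length = k := by
  induction k with
  | zero => exact ⟨[], by simp, by simp, rfl⟩
  | succ k ih =>
    obtain ⟨out, hfold, harr, hlen⟩ := ih (by omega)
    have hklt : k < y.length := by omega
    have hfirlen : fir.length = y.length := by simp [hfir]
    have hfirk : fir[k]? = some (bpfFir b y k) := by
      simp [hfir, List.getElem?_map, List.getElem?_range hklt]
    -- B side: one more enumerated element
    have htake : (PySem.List.enumerate fir 0).take (k + 1)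
        = (PySem.List.enumerate fir 0).take k ++ [((k : Int), bpfFir b y k)] := by
      rw [List.take_succ, PySem.List.getElem?_enumerate, hfirk]
      simp
    -- value read by both at index k
    have hy0 : PySem.List.pyGetD y ((k : Nat) : Int) 0 = y.getD k 0 := by
      rw [PySem.List.pyGetD_natCast]
    -- B's step result
    have hBstep : ((PySem.List.enumerate fir 0).take (k + 1)).foldl
          (bpfFbStep (a_coeffs.getD 1 0) (a_coeffs.getD 2 0) fp) []
        = out ++ [bpfFir b y k
            - (if fp then (if 1 ≤ (k:Int) then a_coeffs.getD 1 0 * out.getD ((k:Int) - 1).toNat 0 else 0) >>> 16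
               else (if 1 ≤ (k:Int) then a_coeffs.getD 1 0 * out.getD ((k:Int) - 1).toNat 0 else 0))
            - (if fp then (if 2 ≤ (k:Int) then a_coeffs.getD 2 0 * out.getD ((k:Int) - 2).toNat 0 else 0) >>> 16
               else (if 2 ≤ (k:Int) then a_coeffs.getD 2 0 * out.getD ((k:Int) - 2).toNat 0 else 0))] := by
      rw [htake, List.foldl_append, hfold]
      simp [bpfFbStep]
    -- A-side reads of the partially-filled array
    have hn1 : 1 ≤ k → PySem.List.pyGetD (out ++ List.replicate (y.length - k) 0) ((k : Int) - 1) 0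
        = out.getD (k - 1) 0 := by
      intro h1
      have : ((k : Int) - 1) = ((k - 1 : Nat) : Int) := by omega
      rw [this, PySem.List.pyGetD_natCast]
      simp [List.getD, List.getElem?_append_left (by omega : k - 1 < out.length)]
    have hn2 : 2 ≤ k → PySem.List.pyGetD (out ++ List.replicate (y.length - k) 0) ((k : Int) - 2) 0
        = out.getD (k - 2) 0 := by
      intro h2
      have : ((k : Int) - 2) = ((k - 2 : Nat) : Int) := by omega
      rw [this, PySem.List.pyGetD_natCast]
      simp [List.getD, List.getElem?_append_left (by omega : k - 2 < out.length)]
    -- A's step value equals B's appended value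
    have hAv : bpfStep y a_coeffs b_coeffs fp (out ++ List.replicate (y.length - k) 0) k
        = (out ++ List.replicate (y.length - k) 0).set k
            (bpfFir b y k
              - (if fp then (if 1 ≤ (k:Int) then a_coeffs.getD 1 0 * out.getD ((k:Int) - 1).toNat 0 else 0) >>> 16
                 else (if 1 ≤ (k:Int) then a_coeffs.getD 1 0 * out.getD ((k:Int) - 1).toNat 0 else 0))
              - (if fp then (if 2 ≤ (k:Int) then a_coeffs.getD 2 0 * out.getD ((k:Int) - 2).toNat 0 else 0) >>> 16
                 else (if 2 ≤ (k:Int) then a_coeffs.getD 2 0 * out.getD ((k:Int) - 2).toNat 0 else 0))) := by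
      unfold bpfStep
      have hb0 := coeff_eq b_coeffs 0 (by norm_num)
      have hb1 := coeff_eq b_coeffs 1 (by norm_num)
      have hb2 := coeff_eq b_coeffs 2 (by norm_num)
      norm_num at hb0 hb1 hb2
      rcases Nat.lt_or_ge k 2 with hk2 | hk2
      · interval_cases k
        · -- index 0
          have hfir0 : bpfFir b y 0 = 0 + b.getD 0 0 * y.getD 0 0 := by
            simp [bpfFir, List.range_succ]
          subst hb
          congr 1
          cases fp <;> simp [hfir0, hy0, hb0, Int.zero_shiftRight, PySem.List.pyGetD_zero,
            PySem.List.pyGetD_ofNat', List.getD_eq_getElem?_getD] <;> ring_nf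
        · -- index 1
          have hfir1 : bpfFir b y 1 = 0 + b.getD 0 0 * y.getD 1 0 + b.getD 1 0 * y.getD 0 0 := by
            simp [bpfFir, List.range_succ]
          have hy1 : PySem.List.pyGetD y ((1 : Nat) - 1 : Int) 0 = y.getD 0 0 := by
            norm_num [PySem.List.pyGetD_zero, List.getD_eq_getElem?_getD]
          have hr1 := hn1 (by omega)
          subst hb
          have e1 : (((1:Nat):Int) - 1).toNat = 0 := by norm_num
          have ho1 : (out ++ List.replicate (y.length - 1) (0:Int))[0]? = out[0]? :=
            List.getElem?_append_left (by omega)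
          congr 1
          cases fp <;>
            simp [hfir1, hy0, hy1, hb0, hb1, hr1, e1, ho1, Int.zero_shiftRight,
              PySem.List.pyGetD_natCast, PySem.List.pyGetD_zero, PySem.List.pyGetD_ofNat',
              List.getD_eq_getElem?_getD] <;> ring_nf
      · -- index ≥ 2
        have hk0 : ¬ (k = 0) := by omega
        have hk1 : ¬ (k = 1) := by omega
        have hfir : bpfFir b y k = 0 + b.getD 0 0 * y.getD k 0 + b.getD 1 0 * y.getD (k - 1) 0
            + b.getD 2 0 * y.getD (k - 2) 0 := by
          unfold bpfFir
          have h3 : (List.range 3).filter (fun j => j ≤ k) = [0, 1, 2] := by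
            simp [List.range_succ, List.filter, show 0 ≤ k by omega, show 1 ≤ k by omega,
              show 2 ≤ k by omega]
          rw [h3]
          simp [List.foldl]
        have hy1 : PySem.List.pyGetD y ((k : Int) - 1) 0 = y.getD (k - 1) 0 := by
          have : ((k : Int) - 1) = ((k - 1 : Nat) : Int) := by omega
          rw [this, PySem.List.pyGetD_natCast]
        have hy2 : PySem.List.pyGetD y ((k : Int) - 2) 0 = y.getD (k - 2) 0 := by
          have : ((k : Int) - 2) = ((k - 2 : Nat) : Int) := by omega
          rw [this, PySem.List.pyGetD_natCast]
        have hr1 := hn1 (by omega)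
        have hr2 := hn2 (by omega)
        have e1 : ((k:Int) - 1).toNat = k - 1 := by omega
        have e2 : ((k:Int) - 2).toNat = k - 2 := by omega
        have c1 : (1 : Int) ≤ (k : Int) := by omega
        have c2 : (2 : Int) ≤ (k : Int) := by omega
        subst hb
        have ho1 : (out ++ List.replicate (y.length - k) (0:Int))[k-1]? = out[k-1]? :=
          List.getElem?_append_left (by omega)
        have ho2 : (out ++ List.replicate (y.length - k) (0:Int))[k-2]? = out[k-2]? :=
          List.getElem?_append_left (by omega)
        have ha1 : PySem.List.pyGetD a_coeffs 1 0 = a_coeffs.getD 1 0 := by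
          have h := PySem.List.pyGetD_natCast a_coeffs (1 : Nat) (0 : Int)
          norm_num at h
          exact h
        have ha2 : PySem.List.pyGetD a_coeffs 2 0 = a_coeffs.getD 2 0 := by
          have h := PySem.List.pyGetD_natCast a_coeffs (2 : Nat) (0 : Int)
          norm_num at h
          exact h
        congr 1
        cases fp <;>
          simp [hfir, hy0, hy1, hy2, hb0, hb1, hb2, hr1, hr2, hk0, hk1,
            e1, e2, c1, c2, ho1, ho2, ha1, ha2, PySem.List.pyGetD_natCast,
            List.getD_eq_getElem?_getD] <;> ring_nf
    -- setting position k extends out by one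
    have hset : ∀ v : Int, (out ++ List.replicate (y.length - k) 0).set k v
        = (out ++ [v]) ++ List.replicate (y.length - (k + 1)) 0 := by
      intro v
      have hrep : List.replicate (y.length - k) (0 : Int)
          = 0 :: List.replicate (y.length - (k + 1)) 0 := by
        have : y.length - k = (y.length - (k + 1)) + 1 := by omega
        rw [this, List.replicate_succ]
      rw [hrep, List.set_append_right _ _ (by omega : out.length ≤ k)]
      simp [hlen]
    refine ⟨_, hBstep, ?_, by simp [hlen]⟩
    rw [List.range_succ, List.foldl_append, harr]
    simp only [List.foldl_cons, List.foldl_nil, hAv, hset]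
-- (the getD index casts: B reads out[(i-1).toNat] = out[k-1], matching A's new_y[index-1])

lemma bpf_eq_alt (y a_coeffs b_coeffs : List Int) (fp : Bool) :
    bpf y a_coeffs b_coeffs fp = bpf_alt y a_coeffs b_coeffs fp := by
  obtain ⟨out, hfold, harr, hlen⟩ :=
    bpf_inv y a_coeffs b_coeffs fp _ _ rfl rfl y.length le_rfl
  have hys : y.map (fun v => v) = y := by simp
  have htl : (PySem.List.enumerate ((List.range y.length).map
        (bpfFir ((b_coeffs ++ [0, 0, 0]).take 3) y)) 0).take y.length
      = PySem.List.enumerate ((List.range y.length).map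
        (bpfFir ((b_coeffs ++ [0, 0, 0]).take 3) y)) 0 := by
    apply List.take_of_length_le
    simp [PySem.List.length_enumerate]
  rw [htl] at hfold
  unfold bpf bpf_alt
  simp only [hys]
  rw [harr]
  have hn : y.length - y.length = 0 := by omega
  rw [hn]
  simp only [List.replicate_zero, List.append_nil, atap_eq]
  exact hfold.symm

-- ===== VERDICT (by name: the statement is the Claim_ definition above) =====
theorem bpf_spec : Claim_equal_bpf := by
  intro y a_coeffs b_coeffs fp _ _
  exact bpf_eq_alt y a_coeffs b_coeffs fp
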